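-- pv_equiv track=rewrite | github.com/almala333/EEBE-problemas-Jutge-Q1-24-25 | 03_Iteraciones/X97337_Univariate words.py | is_univariate_word
-- ===== SOURCE A (Python) =====
-- def is_univariate_word(s):
--     '''
--     Parametres
--     ----------
--     s : str
--         Cadena de caràcters a comprovar.
--
--     Retorna
--     -------
--     bool
--         True si tots els caràcters de la cadena són iguals, False en cas contrari.
--
--     Tests públics
--     -------------
--     >>> is_univariate_word('xxXxxxXX')
--     True
--     >>> is_univariate_word('xyyyyYYY')
--     False
--     >>> is_univariate_word('y')
--     True
--     >>> is_univariate_word('yyyyx')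
--     False
--
--     Tests privats
--     -------------
--     >>> is_univariate_word('aaaa')
--     True
--     >>> is_univariate_word('abcde')
--     False
--     >>> is_univariate_word('AaAaAa')
--     True
--     >>> is_univariate_word('12345')
--     False
--     '''
--
--     first_letter = s[0]
--     condition = True
--     if first_letter.isupper():
--         first_letter = first_letter.lower()
--     for letter in s:
--         if letter.lower() != first_letter:
--             condition = False
--     return condition
-- ===== SOURCE B (Python) =====
-- def is_univariate_word(s):
--     return len(set(s.lower())) == 1
-- ===== Notes on version B (the rewrite author's own statement) =====
-- stated objective: idiomatic
-- what changed: Instead of scanning each character against the lowercased first character with a late-set flag, B builds the set of distinct lowercased characters and tests that it has exactly one element; no reference to s[0] or per-character comparison remains.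
import Mathlib
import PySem

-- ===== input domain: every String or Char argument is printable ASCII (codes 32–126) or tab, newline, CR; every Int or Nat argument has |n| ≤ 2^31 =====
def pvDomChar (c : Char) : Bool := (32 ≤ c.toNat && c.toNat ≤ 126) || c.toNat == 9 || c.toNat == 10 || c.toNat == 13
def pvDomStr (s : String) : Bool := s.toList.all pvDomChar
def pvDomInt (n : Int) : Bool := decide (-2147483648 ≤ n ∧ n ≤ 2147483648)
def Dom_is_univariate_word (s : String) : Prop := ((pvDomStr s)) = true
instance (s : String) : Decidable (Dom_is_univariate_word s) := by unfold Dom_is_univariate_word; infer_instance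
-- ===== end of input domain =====

-- B decides univariateness by counting distinct lowercased characters (len(set(s.lower())) == 1) instead of A's flagged scan against the lowered first character (idiomatic; equal on all non-empty strings).


-- ===== PORT A =====
def is_univariate_word (s : String) : Bool :=
  match PySem.List.pyGet? s.toList 0 with
  | none => false   -- IndexError on the empty string; excluded by Pre_
  | some c0 =>
    let first_letter := if PySem.Chars.isupper c0 then PySem.Chars.lowerChar c0 else c0
    s.toList.foldl (fun condition letter =>
      if PySem.Chars.lowerChar letter ≠ first_letter then false else condition) true

-- ===== PORT B =====
def is_univariate_word_alt (s : String) : Bool :=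
  PySem.Set.len (PySem.Set.ofList (PySem.Chars.lower s.toList)) == 1

-- ===== PRECONDITION & SPEC =====
-- Pre_ excludes exactly the empty string, on which A raises IndexError at s[0].
def Pre_is_univariate_word (s : String) : Prop := s ≠ ""
instance (s : String) : Decidable (Pre_is_univariate_word s) := by unfold Pre_is_univariate_word; infer_instance
def pvWitness_is_univariate_word : String := "xxXx"

def Spec_is_univariate_word (s : String) (out : Bool) : Prop := out = is_univariate_word_alt s
instance (s : String) (out : Bool) : Decidable (Spec_is_univariate_word s out) := by unfold Spec_is_univariate_word; infer_instance

-- ===== CLAIM (what is proved, stated in full; the proofs are below) =====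
def Claim_equal_is_univariate_word : Prop := ∀ (s : String), Dom_is_univariate_word s → Pre_is_univariate_word s → Spec_is_univariate_word s (is_univariate_word s)

-- ===== LEMMAS AND PROOFS =====

-- A's conditional lowering of the first letter is just lowerChar.
theorem pv_first_eq (c : Char) :
    (if PySem.Chars.isupper c then PySem.Chars.lowerChar c else c) = PySem.Chars.lowerChar c := by
  by_cases h : PySem.Chars.isupper c <;> simp [PySem.Chars.lowerChar, h]

-- A's late-set flag fold, generalized over the accumulator.
theorem pv_fold_char (l : List Char) (first : Char) (acc : Bool) :
    (l.foldl (fun condition letter =>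
      if PySem.Chars.lowerChar letter ≠ first then false else condition) acc)
    = (acc && l.all (fun letter => PySem.Chars.lowerChar letter == first)) := by
  induction l generalizing acc with
  | nil => simp
  | cons c l ih =>
    simp only [List.foldl_cons, List.all_cons, ih]
    by_cases h : PySem.Chars.lowerChar c = first <;> simp [h]

-- A nodup list containing a whose elements are all a is exactly [a].
theorem pv_nodup_singleton (L : List Char) (a : Char) (hnd : L.Nodup) (ha : a ∈ L)
    (hall : ∀ y ∈ L, y = a) : L = [a] := by
  match L, hnd, ha with
  | [a'], _, ha => simp_all
  | x :: y :: t, hnd, _ =>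
    have hx : x = a := hall x (by simp)
    have hy : y = a := hall y (by simp)
    simp [hx, hy] at hnd

-- The distinct lowered characters number exactly one iff every char lowers to the head's lowering.
theorem pv_set_char (a : Char) (T : List Char) :
    ((PySem.Set.ofList (a :: T)).length = 1) ↔ (∀ x ∈ T, x = a) := by
  constructor
  · intro h x hx
    have hxm : x ∈ PySem.Set.ofList (a :: T) := (PySem.Set.mem_ofList _ _).mpr (by simp [hx])
    have ham : a ∈ PySem.Set.ofList (a :: T) := (PySem.Set.mem_ofList _ _).mpr (by simp)
    match hL : PySem.Set.ofList (a :: T), h with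
    | [y], _ =>
      rw [hL] at hxm ham
      simp at hxm ham
      rw [hxm, ham]
  · intro h
    have : PySem.Set.ofList (a :: T) = [a] :=
      pv_nodup_singleton _ a (PySem.Set.nodup_ofList _)
        ((PySem.Set.mem_ofList _ _).mpr (by simp))
        (fun y hy => by
          have := (PySem.Set.mem_ofList _ _).mp hy
          rcases List.mem_cons.mp this with h' | h'
          · exact h'
          · exact h y h')
    simp [this]

theorem pv_main (c0 : Char) (t : List Char) :
    ((c0 :: t).foldl (fun condition letter =>
      if PySem.Chars.lowerChar letter ≠ PySem.Chars.lowerChar c0 then false else condition) true)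
    = (PySem.Set.len (PySem.Set.ofList (PySem.Chars.lower (c0 :: t))) == 1) := by
  rw [pv_fold_char]
  have hlow : PySem.Chars.lower (c0 :: t)
      = PySem.Chars.lowerChar c0 :: t.map PySem.Chars.lowerChar := by
    simp [PySem.Chars.lower]
  rw [hlow]
  apply Bool.eq_iff_iff.mpr
  rw [show PySem.Set.len (PySem.Set.ofList (PySem.Chars.lowerChar c0 :: t.map PySem.Chars.lowerChar))
        = ((PySem.Set.ofList (PySem.Chars.lowerChar c0 :: t.map PySem.Chars.lowerChar)).length : Int)
      from rfl]
  have := pv_set_char (PySem.Chars.lowerChar c0) (t.map PySem.Chars.lowerChar)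
  constructor
  · intro h
    simp only [List.all_cons, Bool.and_eq_true, List.all_eq_true, beq_iff_eq] at h
    have h1 : (PySem.Set.ofList (PySem.Chars.lowerChar c0 :: t.map PySem.Chars.lowerChar)).length = 1 := by
      apply this.mpr
      intro x hx
      rcases List.mem_map.mp hx with ⟨y, hy, rfl⟩
      exact h.2.2 y hy
    simp [h1]
  · intro h
    have hlen : ((PySem.Set.ofList (PySem.Chars.lowerChar c0 :: t.map PySem.Chars.lowerChar)).length : Int) = 1 := by
      simpa using h
    have h1 : (PySem.Set.ofList (PySem.Chars.lowerChar c0 :: t.map PySem.Chars.lowerChar)).length = 1 := by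
      omega
    have hall := this.mp h1
    simp only [List.all_cons, Bool.and_eq_true, List.all_eq_true, beq_iff_eq]
    exact ⟨trivial, trivial, fun y hy => hall (PySem.Chars.lowerChar y) (List.mem_map_of_mem hy)⟩

-- ===== VERDICT (by name: the statement is the Claim_ definition above) =====
theorem is_univariate_word_spec : Claim_equal_is_univariate_word := by
  intro s _ hpre
  unfold Spec_is_univariate_word is_univariate_word is_univariate_word_alt
  have hne : s.toList ≠ [] := by
    intro h
    exact hpre (by simpa using congrArg String.ofList h)
  cases hl : s.toList with
  | nil => exact absurd hl hne
  | cons c0 t =>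
    have hget : PySem.List.pyGet? (c0 :: t) (0 : Int) = some c0 := by
      simp [PySem.List.pyGet?, PySem.List.pyIdx?]
    rw [hget]
    simp only [pv_first_eq]
    exact pv_main c0 t
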